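-- pv_equiv track=rewrite | github.com/cuhk-s3/Archer | experiment/2-regression/gen_upset_diagram.py | build_intersection_counts
-- ===== SOURCE A (Python) =====
-- def build_intersection_counts(gemini_found, deepseek_found, qwen_found):
--   """Build aggregated intersection counts keyed by membership tuple (G, D, Q)."""
--   all_issues = sorted(gemini_found | deepseek_found | qwen_found)
--   counts: dict[tuple[bool, bool, bool], int] = {}
--
--   for issue_id in all_issues:
--     mask = (
--       issue_id in gemini_found,
--       issue_id in deepseek_found,
--       issue_id in qwen_found,
--     )
--     counts[mask] = counts.get(mask, 0) + 1
--
--   ordered = sorted(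
--     counts.items(),
--     key=lambda kv: (kv[1], sum(kv[0]), kv[0]),
--     reverse=True,
--   )
--   return ordered
-- ===== SOURCE B (Python) =====
-- def build_intersection_counts(gemini_found, deepseek_found, qwen_found):
--   """Build aggregated intersection counts keyed by membership tuple (G, D, Q)."""
--   G, D, Q = gemini_found, deepseek_found, qwen_found
--   regions = [
--     ((True, True, True), len(G & D & Q)),
--     ((True, True, False), len((G & D) - Q)),
--     ((True, False, True), len((G & Q) - D)),
--     ((False, True, True), len((D & Q) - G)),
--     ((True, False, False), len(G - D - Q)),
--     ((False, True, False), len(D - G - Q)),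
--     ((False, False, True), len(Q - G - D)),
--   ]
--   counts = {mask: c for mask, c in regions if c > 0}
--   return sorted(counts.items(), key=lambda kv: (kv[1], sum(kv[0]), kv[0]), reverse=True)
-- ===== Notes on version B (the rewrite author's own statement) =====
-- stated objective: idiomatic
-- what changed: Instead of sorting the union of the three sets and bucketing each issue by its membership mask in a dict loop, B computes the seven Venn-region cardinalities directly with set algebra (&, -), keeps the non-empty ones, and applies the same final sort.
import Mathlib
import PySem

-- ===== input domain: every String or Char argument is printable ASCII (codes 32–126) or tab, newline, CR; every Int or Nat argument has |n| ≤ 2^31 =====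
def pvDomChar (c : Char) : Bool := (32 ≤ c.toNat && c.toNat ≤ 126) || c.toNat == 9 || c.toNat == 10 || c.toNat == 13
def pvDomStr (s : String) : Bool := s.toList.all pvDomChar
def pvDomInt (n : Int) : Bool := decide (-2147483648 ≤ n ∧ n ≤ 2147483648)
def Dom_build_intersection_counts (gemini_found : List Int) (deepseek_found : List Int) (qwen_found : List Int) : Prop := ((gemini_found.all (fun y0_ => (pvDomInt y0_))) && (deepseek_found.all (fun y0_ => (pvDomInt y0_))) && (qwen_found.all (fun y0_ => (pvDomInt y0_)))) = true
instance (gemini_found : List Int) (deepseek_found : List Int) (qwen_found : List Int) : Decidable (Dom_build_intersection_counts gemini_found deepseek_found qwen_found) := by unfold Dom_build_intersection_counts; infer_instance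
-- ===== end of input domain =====

-- B replaces A's sort-the-union-and-bucket-by-mask loop by direct set algebra: each of the
-- seven membership regions is computed once with & and -, zero regions dropped, same final sort.

-- ===== PORT A =====
-- the sort key 'lambda kv: (kv[1], sum(kv[0]), kv[0])' — Python's lexicographic tuple order,
-- modelled with Mathlib's Lex on products (Bool's order false < true matches Python's False < True)
def pvMaskSum (m : Bool × Bool × Bool) : Int :=
  (if m.1 then 1 else 0) + (if m.2.1 then 1 else 0) + (if m.2.2 then 1 else 0)

def pvSortKey (kv : (Bool × Bool × Bool) × Int) : Lex (Int × Lex (Int × Lex (Bool × Lex (Bool × Bool)))) :=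
  toLex (kv.2, toLex (pvMaskSum kv.1, toLex (kv.1.1, toLex (kv.1.2.1, kv.1.2.2))))

def build_intersection_counts (gemini_found : List Int) (deepseek_found : List Int) (qwen_found : List Int) : List ((Bool × Bool × Bool) × Int) :=
  let all_issues := PySem.List.sorted (PySem.Set.union (PySem.Set.union (PySem.Set.ofList gemini_found) deepseek_found) qwen_found) (fun x => x)
  let counts := all_issues.foldl (fun counts issue_id =>
      let mask := (gemini_found.contains issue_id, deepseek_found.contains issue_id, qwen_found.contains issue_id)
      counts.insert mask (counts.getD mask 0 + 1))
    PySem.Dict.empty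
  PySem.List.sorted counts.items pvSortKey true

-- ===== PORT B =====
def build_intersection_counts_alt (gemini_found : List Int) (deepseek_found : List Int) (qwen_found : List Int) : List ((Bool × Bool × Bool) × Int) :=
  let G := PySem.Set.ofList gemini_found
  let D := PySem.Set.ofList deepseek_found
  let Q := PySem.Set.ofList qwen_found
  let regions : List ((Bool × Bool × Bool) × Int) := [
    ((true, true, true), PySem.Set.len (PySem.Set.inter (PySem.Set.inter G deepseek_found) qwen_found)),
    ((true, true, false), PySem.Set.len (PySem.Set.diff (PySem.Set.inter G deepseek_found) qwen_found)),
    ((true, false, true), PySem.Set.len (PySem.Set.diff (PySem.Set.inter G qwen_found) deepseek_found)),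
    ((false, true, true), PySem.Set.len (PySem.Set.diff (PySem.Set.inter D qwen_found) gemini_found)),
    ((true, false, false), PySem.Set.len (PySem.Set.diff (PySem.Set.diff G deepseek_found) qwen_found)),
    ((false, true, false), PySem.Set.len (PySem.Set.diff (PySem.Set.diff D gemini_found) qwen_found)),
    ((false, false, true), PySem.Set.len (PySem.Set.diff (PySem.Set.diff Q gemini_found) deepseek_found))]
  -- the dict comprehension '{mask: c for mask, c in regions if c > 0}': the seven mask keys are
  -- pairwise distinct literals, so the dict's items are exactly the kept pairs in order (exact)
  let counts := regions.filter (fun kv => decide (0 < kv.2))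
  PySem.List.sorted counts pvSortKey true

-- ===== PRECONDITION & SPEC =====
def Spec_build_intersection_counts (gemini_found : List Int) (deepseek_found : List Int) (qwen_found : List Int) (out : List ((Bool × Bool × Bool) × Int)) : Prop := out = build_intersection_counts_alt gemini_found deepseek_found qwen_found
instance (gemini_found : List Int) (deepseek_found : List Int) (qwen_found : List Int) (out : List ((Bool × Bool × Bool) × Int)) : Decidable (Spec_build_intersection_counts gemini_found deepseek_found qwen_found out) := by unfold Spec_build_intersection_counts; infer_instance

-- ===== CLAIM (what is proved, stated in full; the proofs are below) =====
def Claim_equal_build_intersection_counts : Prop := ∀ (gemini_found : List Int) (deepseek_found : List Int) (qwen_found : List Int), Dom_build_intersection_counts gemini_found deepseek_found qwen_found → Spec_build_intersection_counts gemini_found deepseek_found qwen_found (build_intersection_counts gemini_found deepseek_found qwen_found)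

-- ===== LEMMAS AND PROOFS =====

-- the mask of one issue, A's deduplicated union, the list of masks A buckets over,
-- and B's region table (all rfl-equal to the corresponding subterms of the ports)
def pvMaskOf (g d q : List Int) (x : Int) : Bool × Bool × Bool :=
  (g.contains x, d.contains x, q.contains x)

def pvUnion (g d q : List Int) : List Int :=
  PySem.Set.union (PySem.Set.union (PySem.Set.ofList g) d) q

def pvMasks (g d q : List Int) : List (Bool × Bool × Bool) :=
  (PySem.List.sorted (pvUnion g d q) (fun x => x)).map (pvMaskOf g d q)

def pvRegions (g d q : List Int) : List ((Bool × Bool × Bool) × Int) := [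
    ((true, true, true), PySem.Set.len (PySem.Set.inter (PySem.Set.inter (PySem.Set.ofList g) d) q)),
    ((true, true, false), PySem.Set.len (PySem.Set.diff (PySem.Set.inter (PySem.Set.ofList g) d) q)),
    ((true, false, true), PySem.Set.len (PySem.Set.diff (PySem.Set.inter (PySem.Set.ofList g) q) d)),
    ((false, true, true), PySem.Set.len (PySem.Set.diff (PySem.Set.inter (PySem.Set.ofList d) q) g)),
    ((true, false, false), PySem.Set.len (PySem.Set.diff (PySem.Set.diff (PySem.Set.ofList g) d) q)),
    ((false, true, false), PySem.Set.len (PySem.Set.diff (PySem.Set.diff (PySem.Set.ofList d) g) q)),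
    ((false, false, true), PySem.Set.len (PySem.Set.diff (PySem.Set.diff (PySem.Set.ofList q) g) d))]

lemma pvSortKey_inj : Function.Injective pvSortKey := by
  rintro ⟨⟨a1, a2, a3⟩, c⟩ ⟨⟨b1, b2, b3⟩, e⟩ h
  cases a1 <;> cases a2 <;> cases a3 <;> cases b1 <;> cases b2 <;> cases b3 <;>
    simp_all [pvSortKey, pvMaskSum, toLex]

lemma mem_map_pair {α β : Type} (f : α → β) (l : List α) (p : α × β) :
    p ∈ l.map (fun k => (k, f k)) ↔ p.1 ∈ l ∧ p.2 = f p.1 := by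
  constructor
  · intro h
    obtain ⟨k, hk, he⟩ := List.mem_map.1 h
    cases he; exact ⟨hk, rfl⟩
  · rintro ⟨h1, h2⟩
    exact List.mem_map.2 ⟨p.1, h1, by cases p; simp_all⟩

-- A's dict loop is Counter of the mask list
lemma pvCounts_eq_counter (g d q : List Int) :
    ((PySem.List.sorted (pvUnion g d q) (fun x => x)).foldl (fun counts issue_id =>
        counts.insert (g.contains issue_id, d.contains issue_id, q.contains issue_id)
          (counts.getD (g.contains issue_id, d.contains issue_id, q.contains issue_id) 0 + 1))
      PySem.Dict.empty)
      = PySem.Dict.counter (pvMasks g d q) := by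
  rw [PySem.Dict.counter_eq_foldl, pvMasks, List.foldl_map]
  rfl

-- counting one mask over A's deduplicated union = the length of the matching nodup region list
lemma pvCount_eq_length (g d q : List Int) (m : Bool × Bool × Bool) (R : List Int)
    (hR : R.Nodup)
    (hmem : ∀ x : Int, (x ∈ pvUnion g d q ∧ pvMaskOf g d q x = m) ↔ x ∈ R) :
    (pvMasks g d q).count m = R.length := by
  have hnd : (pvUnion g d q).Nodup :=
    PySem.Set.nodup_union _ _ (PySem.Set.nodup_union _ _ (PySem.Set.nodup_ofList g))
  have h1 : (pvMasks g d q).count m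
      = (PySem.List.sorted (pvUnion g d q) (fun x => x)).countP (fun x => pvMaskOf g d q x == m) := by
    rw [pvMasks, List.count_eq_countP, List.countP_map]
    rfl
  have h2 : (PySem.List.sorted (pvUnion g d q) (fun x => x)).countP (fun x => pvMaskOf g d q x == m)
      = (pvUnion g d q).countP (fun x => pvMaskOf g d q x == m) :=
    (PySem.List.sorted_perm _ _ _).countP_eq _
  have h4 : ((pvUnion g d q).filter (fun x => pvMaskOf g d q x == m)).Perm R := by
    rw [List.perm_ext_iff_of_nodup (hnd.filter _) hR]
    intro x
    rw [List.mem_filter, ← hmem x]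
    simp
  rw [h1, h2, List.countP_eq_length_filter, h4.length_eq]

lemma pvMem_union (g d q : List Int) (x : Int) :
    x ∈ pvUnion g d q ↔ x ∈ g ∨ x ∈ d ∨ x ∈ q := by
  rw [pvUnion, PySem.Set.mem_union, PySem.Set.mem_union, PySem.Set.mem_ofList]
  tauto

lemma pvRegions_filter_nodup (g d q : List Int) :
    ((pvRegions g d q).filter (fun kv => decide (0 < kv.2))).Nodup := by
  apply List.Nodup.filter
  apply List.Nodup.of_map Prod.fst
  simp [pvRegions]

-- the permutation at the heart of the claim: A's dict items vs B's positive regions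
lemma pvItems_perm (g d q : List Int) :
    (PySem.Dict.counter (pvMasks g d q)).items.Perm
      ((pvRegions g d q).filter (fun kv => decide (0 < kv.2))) := by
  have hc7 := pvCount_eq_length g d q (true, true, true)
    (PySem.Set.inter (PySem.Set.inter (PySem.Set.ofList g) d) q)
    (PySem.Set.nodup_inter _ _ (PySem.Set.nodup_inter _ _ (PySem.Set.nodup_ofList g)))
    (by intro x; simp [pvMem_union, pvMaskOf, PySem.Set.mem_inter, PySem.Set.mem_ofList, Prod.ext_iff]; tauto)
  have hc6 := pvCount_eq_length g d q (true, true, false)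
    (PySem.Set.diff (PySem.Set.inter (PySem.Set.ofList g) d) q)
    (PySem.Set.nodup_diff _ _ (PySem.Set.nodup_inter _ _ (PySem.Set.nodup_ofList g)))
    (by intro x; simp [pvMem_union, pvMaskOf, PySem.Set.mem_diff, PySem.Set.mem_inter, PySem.Set.mem_ofList, Prod.ext_iff]; tauto)
  have hc5 := pvCount_eq_length g d q (true, false, true)
    (PySem.Set.diff (PySem.Set.inter (PySem.Set.ofList g) q) d)
    (PySem.Set.nodup_diff _ _ (PySem.Set.nodup_inter _ _ (PySem.Set.nodup_ofList g)))
    (by intro x; simp [pvMem_union, pvMaskOf, PySem.Set.mem_diff, PySem.Set.mem_inter, PySem.Set.mem_ofList, Prod.ext_iff]; tauto)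
  have hc3 := pvCount_eq_length g d q (false, true, true)
    (PySem.Set.diff (PySem.Set.inter (PySem.Set.ofList d) q) g)
    (PySem.Set.nodup_diff _ _ (PySem.Set.nodup_inter _ _ (PySem.Set.nodup_ofList d)))
    (by intro x; simp [pvMem_union, pvMaskOf, PySem.Set.mem_diff, PySem.Set.mem_inter, PySem.Set.mem_ofList, Prod.ext_iff]; tauto)
  have hc4 := pvCount_eq_length g d q (true, false, false)
    (PySem.Set.diff (PySem.Set.diff (PySem.Set.ofList g) d) q)
    (PySem.Set.nodup_diff _ _ (PySem.Set.nodup_diff _ _ (PySem.Set.nodup_ofList g)))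
    (by intro x; simp [pvMem_union, pvMaskOf, PySem.Set.mem_diff, PySem.Set.mem_ofList, Prod.ext_iff]; tauto)
  have hc2 := pvCount_eq_length g d q (false, true, false)
    (PySem.Set.diff (PySem.Set.diff (PySem.Set.ofList d) g) q)
    (PySem.Set.nodup_diff _ _ (PySem.Set.nodup_diff _ _ (PySem.Set.nodup_ofList d)))
    (by intro x; simp [pvMem_union, pvMaskOf, PySem.Set.mem_diff, PySem.Set.mem_ofList, Prod.ext_iff]; tauto)
  have hc1 := pvCount_eq_length g d q (false, false, true)
    (PySem.Set.diff (PySem.Set.diff (PySem.Set.ofList q) g) d)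
    (PySem.Set.nodup_diff _ _ (PySem.Set.nodup_diff _ _ (PySem.Set.nodup_ofList q)))
    (by intro x; simp [pvMem_union, pvMaskOf, PySem.Set.mem_diff, PySem.Set.mem_ofList, Prod.ext_iff]; tauto)
  have hc0 := pvCount_eq_length g d q (false, false, false) []
    List.nodup_nil
    (by intro x; simp [pvMem_union, pvMaskOf, Prod.ext_iff]; tauto)
  rw [PySem.Dict.items_counter]
  refine (List.perm_ext_iff_of_nodup ?_ (pvRegions_filter_nodup g d q)).2 ?_
  · exact (PySem.Set.nodup_ofList _).map (fun a b h => congrArg Prod.fst h)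
  · rintro ⟨⟨b1, b2, b3⟩, c⟩
    rw [mem_map_pair, PySem.Set.mem_ofList, ← List.count_pos_iff]
    cases b1 <;> cases b2 <;> cases b3
    · rw [hc0]; simp [pvRegions, List.mem_filter]
    · rw [hc1]; simp [pvRegions, List.mem_filter, PySem.Set.len]; omega
    · rw [hc2]; simp [pvRegions, List.mem_filter, PySem.Set.len]; omega
    · rw [hc3]; simp [pvRegions, List.mem_filter, PySem.Set.len]; omega
    · rw [hc4]; simp [pvRegions, List.mem_filter, PySem.Set.len]; omega
    · rw [hc5]; simp [pvRegions, List.mem_filter, PySem.Set.len]; omega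
    · rw [hc6]; simp [pvRegions, List.mem_filter, PySem.Set.len]; omega
    · rw [hc7]; simp [pvRegions, List.mem_filter, PySem.Set.len]; omega

theorem pvMain (g d q : List Int) :
    build_intersection_counts g d q = build_intersection_counts_alt g d q := by
  simp only [build_intersection_counts, build_intersection_counts_alt]
  have hu : PySem.Set.union (PySem.Set.union (PySem.Set.ofList g) d) q = pvUnion g d q := rfl
  have hr : ([((true, true, true), PySem.Set.len (PySem.Set.inter (PySem.Set.inter (PySem.Set.ofList g) d) q)),
    ((true, true, false), PySem.Set.len (PySem.Set.diff (PySem.Set.inter (PySem.Set.ofList g) d) q)),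
    ((true, false, true), PySem.Set.len (PySem.Set.diff (PySem.Set.inter (PySem.Set.ofList g) q) d)),
    ((false, true, true), PySem.Set.len (PySem.Set.diff (PySem.Set.inter (PySem.Set.ofList d) q) g)),
    ((true, false, false), PySem.Set.len (PySem.Set.diff (PySem.Set.diff (PySem.Set.ofList g) d) q)),
    ((false, true, false), PySem.Set.len (PySem.Set.diff (PySem.Set.diff (PySem.Set.ofList d) g) q)),
    ((false, false, true), PySem.Set.len (PySem.Set.diff (PySem.Set.diff (PySem.Set.ofList q) g) d))] :
      List ((Bool × Bool × Bool) × Int)) = pvRegions g d q := rfl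
  rw [hu, hr, pvCounts_eq_counter]
  apply PySem.List.sorted_rev_eq_of_perm_of_pairwise_gt
  · exact (PySem.List.sorted_perm _ _ _).trans (pvItems_perm g d q).symm
  · have hle := PySem.List.sorted_pairwise_rev ((pvRegions g d q).filter (fun kv => decide (0 < kv.2))) pvSortKey
    have hnd : (PySem.List.sorted ((pvRegions g d q).filter (fun kv => decide (0 < kv.2))) pvSortKey true).Nodup :=
      (PySem.List.sorted_perm _ _ _).nodup_iff.2 (pvRegions_filter_nodup g d q)
    exact (hle.and hnd).imp (fun {a b} h =>
      lt_of_le_of_ne h.1 (fun he => h.2 ((pvSortKey_inj he).symm)))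

-- ===== VERDICT (by name: the statement is the Claim_ definition above) =====
theorem build_intersection_counts_spec : Claim_equal_build_intersection_counts := by
  intro g d q _
  unfold Spec_build_intersection_counts
  exact pvMain g d q
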